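-- pv_equiv track=rewrite | github.com/mahos551/CSIT999-ResearchProject-6545300-sm765- | soham.py | t1_tweak
-- ===== SOURCE A (Python) =====
-- def t1_tweak(itemsets):
--     max_ = 0
--     for i in itemsets.values():
--         max_ = len(i) if max_ < len(i) else max_
--
--     temp = [[] for i in range(max_)]
--
--     for i in range(len(itemsets)):
--         for j in range(max_):
--             val = " --- "
--             if j < len(list(itemsets.values())[i]):
--                 val = list(itemsets.values())[i][j]
--
--             temp[j].append(val)
--
--     return temp
-- ===== SOURCE B (Python) =====
-- def t1_tweak(itemsets):
--     rows = list(itemsets.values())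
--     cols = []
--     while any(rows):
--         cols.append([r[0] if r else " --- " for r in rows])
--         rows = [r[1:] for r in rows]
--     return cols
-- ===== Notes on version B (the rewrite author's own statement) =====
-- stated objective: alternative
-- what changed: A computes the max length, pre-allocates that many empty columns and fills them cell by cell with nested index loops (rebuilding list(itemsets.values()) per cell); B never computes a max or pads: it peels one column per iteration of a while loop, taking each row's head (placeholder for an exhausted row) and continuing on the tails until every row is empty.
import Mathlib
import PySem

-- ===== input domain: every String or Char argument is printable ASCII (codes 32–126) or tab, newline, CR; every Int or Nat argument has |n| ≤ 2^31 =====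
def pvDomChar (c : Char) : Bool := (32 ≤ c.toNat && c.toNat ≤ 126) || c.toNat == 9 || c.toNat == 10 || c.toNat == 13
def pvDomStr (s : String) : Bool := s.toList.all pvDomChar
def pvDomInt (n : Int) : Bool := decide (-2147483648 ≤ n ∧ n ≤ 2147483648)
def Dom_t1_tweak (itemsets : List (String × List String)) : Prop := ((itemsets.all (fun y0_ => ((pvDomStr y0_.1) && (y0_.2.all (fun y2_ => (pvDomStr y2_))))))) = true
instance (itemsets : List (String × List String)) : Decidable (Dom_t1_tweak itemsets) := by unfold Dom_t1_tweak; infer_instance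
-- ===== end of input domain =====

-- B replaces A's nested index loops over pre-allocated columns (with a separate max-length pass and
-- repeated values() materialisation) by a while loop that peels one column per step: each row's head
-- (placeholder if exhausted), then the tails, until every row is empty — no max, no padding, no indices.


-- ===== PORT A =====
-- the dict parameter: an insertion-ordered association list, realised as PySem.Dict
def t1_tweak (itemsets : List (String × List String)) : List (List String) :=
  let d := PySem.Dict.ofList itemsets
  -- max_ = 0; for i in itemsets.values(): max_ = len(i) if max_ < len(i) else max_
  let max_ : Int := d.values.foldl (fun m i => if m < (i.length : Int) then (i.length : Int) else m) 0
  -- temp = [[] for i in range(max_)]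
  let temp : List (List String) := (PySem.List.pyRange 0 max_).map (fun _ => ([] : List String))
  -- for i in range(len(itemsets)): for j in range(max_): …
  (PySem.List.pyRange 0 (d.size : Int)).foldl (fun temp i =>
    (PySem.List.pyRange 0 max_).foldl (fun temp j =>
      let val : String :=
        if j < ((PySem.List.pyGetD d.values i []).length : Int) then
          PySem.List.pyGetD (PySem.List.pyGetD d.values i []) j " --- "
        else " --- "
      -- temp[j].append(val): j ∈ range(max_) is nonnegative and < len(temp), so .set j.toNat is exact here
      temp.set j.toNat (PySem.List.pyGetD temp j [] ++ [val])) temp) temp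

-- ===== PORT B =====
-- measure for the while loop's termination, with the two facts the decreasing_by cites
def pvMaxLen (rows : List (List String)) : Nat := (rows.map List.length).foldl max 0

theorem pv_any_pos (rows : List (List String)) (h : rows.any (fun r => !r.isEmpty) = true) :
    0 < pvMaxLen rows := by
  obtain ⟨r, hr, hne⟩ := List.any_eq_true.mp h
  have hlen : r.length ∈ rows.map List.length := List.mem_map.mpr ⟨r, hr, rfl⟩
  have hle := (PySem.List.le_foldl_max (rows.map List.length) 0).2 r.length hlen
  have : 0 < r.length := by
    cases r with
    | nil => simp at hne
    | cons x t => simp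
  exact Nat.lt_of_lt_of_le this hle

theorem pv_foldl_max_pred (ls : List Nat) : ∀ (a : Nat),
    (ls.map (fun x => x - 1)).foldl max (a - 1) = (ls.foldl max a) - 1 := by
  induction ls with
  | nil => intro a; rfl
  | cons x t ih =>
      intro a
      simp only [List.map_cons, List.foldl_cons]
      rw [show max (a - 1) (x - 1) = max a x - 1 by omega, ih]

theorem pv_maxLen_drop (rows : List (List String)) :
    pvMaxLen (rows.map (fun r => r.drop 1)) = pvMaxLen rows - 1 := by
  unfold pvMaxLen
  rw [List.map_map]
  have : (List.length ∘ fun r : List String => r.drop 1) = (fun x => x - 1) ∘ List.length := by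
    funext r; simp
  rw [this, ← List.map_map, show (0 : Nat) = 0 - 1 from rfl, pv_foldl_max_pred]

-- while any(rows): cols.append([r[0] if r else " --- " for r in rows]); rows = [r[1:] for r in rows]
-- (r[1:] is List.drop 1 — exact for this nonnegative literal slice; r[0] on a nonempty r is its head)
def pvAltLoop (rows : List (List String)) : List (List String) :=
  if h : rows.any (fun r => !r.isEmpty) = true then
    (rows.map (fun r => match r with | [] => " --- " | x :: _ => x)) ::
      pvAltLoop (rows.map (fun r => r.drop 1))
  else []
termination_by pvMaxLen rows
decreasing_by
  have hEq : rows.attach.map (fun x => List.drop 1 x.1) = rows.map (fun r => r.drop 1) := by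
    simp
  rw [hEq, pv_maxLen_drop]
  have := pv_any_pos _ h
  omega

def t1_tweak_alt (itemsets : List (String × List String)) : List (List String) :=
  -- rows = list(itemsets.values()); then the while loop above; return cols
  pvAltLoop (PySem.Dict.ofList itemsets).values

-- ===== PRECONDITION & SPEC =====
def Spec_t1_tweak (itemsets : List (String × List String)) (out : List (List String)) : Prop := out = t1_tweak_alt itemsets
instance (itemsets : List (String × List String)) (out : List (List String)) : Decidable (Spec_t1_tweak itemsets out) := by unfold Spec_t1_tweak; infer_instance

-- ===== CLAIM (what is proved, stated in full; the proofs are below) =====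
def Claim_equal_t1_tweak : Prop := ∀ (itemsets : List (String × List String)), Dom_t1_tweak itemsets → Spec_t1_tweak itemsets (t1_tweak itemsets)

-- ===== LEMMAS AND PROOFS =====

-- A's running-max fold over the value lists computes (the Int cast of) the plain Nat running max
theorem pv_max_fold (vs : List (List String)) : ∀ (a : Nat),
    vs.foldl (fun (m : Int) i => if m < (i.length : Int) then (i.length : Int) else m) (a : Int)
      = (((vs.map List.length).foldl max a : Nat) : Int) := by
  induction vs with
  | nil => intro a; simp
  | cons v t ih =>
      intro a
      simp only [List.foldl_cons, List.map_cons]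
      rcases Nat.lt_or_ge a v.length with h | h
      · rw [if_pos (by exact_mod_cast h), show ((v.length : Int)) = ((v.length : Nat) : Int) from rfl,
            ih v.length, Nat.max_eq_right (Nat.le_of_lt h)]
      · rw [if_neg (by exact_mod_cast Nat.not_lt.mpr h), ih a, Nat.max_eq_left h]

-- one cell of the table: what A's inner branch writes for row v, column j
def pvCell (v : List String) (j : Nat) : String :=
  if j < v.length then v.getD j " --- " else " --- "

-- shift an index-update fold past a cons
theorem pv_setfold_cons (c : Nat → String) (l : List Nat) :
    ∀ (y : List String) (xs : List (List String)),
      l.foldl (fun t j => t.set (j + 1) (t.getD (j + 1) [] ++ [c (j + 1)])) (y :: xs)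
        = y :: l.foldl (fun t j => t.set j (t.getD j [] ++ [c (j + 1)])) xs := by
  induction l with
  | nil => intro y xs; rfl
  | cons j l ih =>
      intro y xs
      simp only [List.foldl_cons, List.set_cons_succ, List.getD_cons_succ]
      exact ih y _

-- the inner j-loop of A updates every slot once: it is a pointwise zipWith-append
theorem pv_setfold (c : Nat → String) : ∀ (t : List (List String)),
    (List.range t.length).foldl (fun t j => t.set j (t.getD j [] ++ [c j])) t
      = List.zipWith (fun row s => row ++ [s]) t ((List.range t.length).map c) := by
  intro t
  induction t generalizing c with
  | nil => rfl
  | cons x xs ih =>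
      rw [List.length_cons, List.range_succ_eq_map, List.foldl_cons, List.foldl_map]
      simp only [List.set_cons_zero, List.getD_cons_zero, Nat.succ_eq_add_one]
      rw [pv_setfold_cons, ih (fun j => c (j + 1))]
      simp [List.map_map, Function.comp_def, Nat.succ_eq_add_one]

-- A's inner loop (Int indices) in zipWith form, for a state of length M
theorem pv_inner_eq (v : List String) (M : Nat) (t : List (List String)) (ht : t.length = M) :
    (PySem.List.pyRange 0 (M : Int)).foldl (fun t j =>
        t.set j.toNat (PySem.List.pyGetD t j [] ++
          [if j < (v.length : Int) then PySem.List.pyGetD v j " --- " else " --- "])) t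
      = List.zipWith (fun row s => row ++ [s]) t ((List.range M).map (pvCell v)) := by
  subst ht
  rw [PySem.List.pyRange_zero_nat, List.foldl_map]
  refine (PySem.List.foldl_congr_mem _ _
      (fun t' j => t'.set j (t'.getD j [] ++ [pvCell v j])) t ?_).trans
    (pv_setfold (pvCell v) t)
  intro t' j _
  simp only [Int.toNat_natCast, PySem.List.pyGetD_natCast, pvCell, Nat.cast_lt]

-- the whole row loop of A, from any column prefix g: column j collects g j then the cells of the rows
theorem pv_outer (M : Nat) : ∀ (vs : List (List String)) (g : Nat → List String),
    vs.foldl (fun t v =>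
        (PySem.List.pyRange 0 (M : Int)).foldl (fun t j =>
          t.set j.toNat (PySem.List.pyGetD t j [] ++
            [if j < (v.length : Int) then PySem.List.pyGetD v j " --- " else " --- "])) t)
      ((List.range M).map g)
      = (List.range M).map (fun j => g j ++ vs.map (fun v => pvCell v j)) := by
  intro vs
  induction vs with
  | nil => intro g; simp
  | cons v t ih =>
      intro g
      rw [List.foldl_cons, pv_inner_eq v M _ (by simp), List.zipWith_map, List.zipWith_self,
          ih (fun j => g j ++ [pvCell v j])]
      simp [List.append_assoc]

-- B-side helper facts: a positive max means some row is still nonempty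
theorem pv_pos_any (rows : List (List String)) (h : 0 < pvMaxLen rows) :
    rows.any (fun r => !r.isEmpty) = true := by
  rcases PySem.List.foldl_max_mem (rows.map List.length) 0 with h0 | hm
  · rw [pvMaxLen] at h; omega
  · obtain ⟨r, hr, hlen⟩ := List.mem_map.mp hm
    refine List.any_eq_true.mpr ⟨r, hr, ?_⟩
    cases r with
    | nil => rw [pvMaxLen] at h; rw [← hlen] at h; simp at h
    | cons x t => simp

-- the column head is A's cell at index 0; peeling a tail shifts A's cell index by one
theorem pv_cell_zero (v : List String) :
    (match v with | [] => " --- " | x :: _ => x) = pvCell v 0 := by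
  cases v <;> simp [pvCell]

theorem pv_cell_succ (v : List String) (j : Nat) : pvCell (v.drop 1) j = pvCell v (j + 1) := by
  cases v with
  | nil => simp [pvCell]
  | cons x t =>
      simp [pvCell]

-- B's while loop produces exactly A's column table
theorem pv_alt_eq : ∀ (n : Nat) (rows : List (List String)), pvMaxLen rows = n →
    pvAltLoop rows = (List.range n).map (fun j => rows.map (fun v => pvCell v j)) := by
  intro n
  induction n with
  | zero =>
      intro rows h
      rw [pvAltLoop.eq_def]
      rw [dif_neg (by intro hany; have := pv_any_pos rows hany; omega)]
      simp
  | succ n ih =>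
      intro rows h
      rw [pvAltLoop.eq_def, dif_pos (pv_pos_any rows (by omega))]
      rw [ih (rows.map (fun r => r.drop 1)) (by rw [pv_maxLen_drop, h]; omega)]
      rw [List.range_succ_eq_map, List.map_cons, List.map_map]
      congr 1
      · exact List.map_congr_left (fun v _ => pv_cell_zero v)
      · apply List.map_congr_left
        intro j _
        rw [List.map_map]
        exact List.map_congr_left (fun v _ => pv_cell_succ v j)

-- the whole of A's computation equals B's column table, for an arbitrary list of value lists
theorem pv_main (vals : List (List String)) :
    (PySem.List.pyRange 0 (vals.length : Int)).foldl (fun temp i =>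
        (PySem.List.pyRange 0
            (vals.foldl (fun (m : Int) i => if m < (i.length : Int) then (i.length : Int) else m) 0)).foldl
          (fun temp j =>
            temp.set j.toNat (PySem.List.pyGetD temp j [] ++
              [if j < ((PySem.List.pyGetD vals i []).length : Int) then
                  PySem.List.pyGetD (PySem.List.pyGetD vals i []) j " --- "
                else " --- "])) temp)
      ((PySem.List.pyRange 0
          (vals.foldl (fun (m : Int) i => if m < (i.length : Int) then (i.length : Int) else m) 0)).map
        (fun _ => ([] : List String)))
      = pvAltLoop vals := by
  set M : Nat := pvMaxLen vals with hM
  have hmax : vals.foldl (fun (m : Int) i => if m < (i.length : Int) then (i.length : Int) else m) 0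
      = (M : Int) := by
    rw [hM, pvMaxLen]; exact_mod_cast pv_max_fold vals 0
  rw [hmax]
  have htemp : (PySem.List.pyRange 0 (M : Int)).map (fun _ => ([] : List String))
      = (List.range M).map (fun _ => ([] : List String)) := by
    rw [PySem.List.pyRange_zero_nat, List.map_map]
    rfl
  rw [htemp]
  have houter := PySem.List.foldl_pyRange_zero_pyGetD' vals ([] : List String)
    (fun temp v =>
      (PySem.List.pyRange 0 (M : Int)).foldl (fun temp j =>
        temp.set j.toNat (PySem.List.pyGetD temp j [] ++
          [if j < (v.length : Int) then PySem.List.pyGetD v j " --- " else " --- "])) temp)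
    ((List.range M).map (fun _ => ([] : List String)))
  rw [houter, pv_outer M vals (fun _ => []), pv_alt_eq M vals hM.symm]
  simp

-- ===== VERDICT (by name: the statement is the Claim_ definition above) =====
theorem t1_tweak_spec : Claim_equal_t1_tweak := by
  intro itemsets _
  show t1_tweak itemsets = t1_tweak_alt itemsets
  simp only [t1_tweak, t1_tweak_alt]
  have hs : ((PySem.Dict.ofList itemsets).size : Int)
      = (((PySem.Dict.ofList itemsets).values).length : Int) := by
    simp [PySem.Dict.size, PySem.Dict.values]
  rw [hs]
  exact pv_main ((PySem.Dict.ofList itemsets).values)
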